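-- pv_equiv track=rewrite | github.com/ibmresilient/resilient-python-api | resilient-lib/resilient_lib/ui/common.py | _find_index_of_end_of_header_block
-- ===== SOURCE A (Python) =====
-- def _find_index_of_end_of_header_block(summary_fields, header_block_name):
--     """
--     Find index where to insert new block, given current ```summary_fields```
--     and ```header_block_name``` which defines the block after which to insert.
--     If ``header_block_name`` not found, return len(summary_fields) (i.e.
--     insert at the end)
--
--     :param summary_fields: list of current summary fields objects
--     :type summary_fields: list[dict]
--     :param header_block_name: string title of the block to insert after (exact match)
--     :type header_block_name: str
--     :return: index of block after header given
--     :rtype: int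
--     """
--     # find index of
--     found = False
--     found_i = len(summary_fields)
--     for i, field in enumerate(summary_fields):
--         # get next header after desired header name is found
--         if found and field.get("element") == "header":
--             found_i = i
--             break
--         # if we've found the matching header, we start the actual search
--         # since we need to find the index of the *next* header to find where to insert
--         if field.get("element") == "header" and field.get("content") == header_block_name:
--             found = True
--
--     return found_i
-- ===== SOURCE B (Python) =====
-- def _find_index_of_end_of_header_block(summary_fields, header_block_name):
--     # Single backwards pass: next_hdr = index of the nearest header strictly
--     # to the right of position i (or len if none). When the named header is
--     # seen, the answer is that successor; the leftmost match is processed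
--     # last, so it overrides any later match.
--     n = len(summary_fields)
--     next_hdr = n
--     ans = n
--     for i in range(n - 1, -1, -1):
--         field = summary_fields[i]
--         if field.get("element") == "header":
--             if field.get("content") == header_block_name:
--                 ans = next_hdr
--             next_hdr = i
--     return ans
-- ===== Notes on version B (the rewrite author's own statement) =====
-- stated objective: alternative
-- what changed: Replaced A's forward flag-and-break loop with a single right-to-left pass that maintains the index of the nearest header to the right; on a name match the answer becomes that successor index, the leftmost match overriding since it is processed last.
import Mathlib
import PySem

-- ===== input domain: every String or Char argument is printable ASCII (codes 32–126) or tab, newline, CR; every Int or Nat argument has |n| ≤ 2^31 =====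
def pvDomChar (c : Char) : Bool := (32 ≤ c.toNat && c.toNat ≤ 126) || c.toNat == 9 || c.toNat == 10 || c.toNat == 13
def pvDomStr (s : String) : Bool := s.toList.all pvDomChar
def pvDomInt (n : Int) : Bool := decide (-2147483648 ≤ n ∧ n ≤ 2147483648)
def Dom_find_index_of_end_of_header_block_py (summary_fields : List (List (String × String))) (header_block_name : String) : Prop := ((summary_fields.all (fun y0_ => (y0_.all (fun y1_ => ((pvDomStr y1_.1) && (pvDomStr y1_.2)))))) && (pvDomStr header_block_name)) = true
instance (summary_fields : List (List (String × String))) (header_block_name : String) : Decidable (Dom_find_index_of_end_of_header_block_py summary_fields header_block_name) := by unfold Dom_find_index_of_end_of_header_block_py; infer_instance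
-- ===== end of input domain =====

-- B replaces A's forward flag-and-break loop by one right-to-left pass tracking the nearest header to the right (alternative decomposition, same cost).

-- ===== PORT A =====
-- A's single forward loop: state (found, found_i), break on the first header after the match.
def pvALoop (header_block_name : String) : List (List (String × String)) → Nat → Bool → Int → Int
  | [], _, _, found_i => found_i
  | field :: rest, i, found, found_i =>
    if found ∧ (PySem.Dict.mk field).get? "element" = some "header" then (i : Int)
    else if (PySem.Dict.mk field).get? "element" = some "header" ∧
            (PySem.Dict.mk field).get? "content" = some header_block_name then
      pvALoop header_block_name rest (i + 1) true found_i
    else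
      pvALoop header_block_name rest (i + 1) found found_i

def find_index_of_end_of_header_block_py (summary_fields : List (List (String × String))) (header_block_name : String) : Int :=
  pvALoop header_block_name summary_fields 0 false (PySem.List.len summary_fields)

-- ===== PORT B =====
-- B's reverse loop as structural recursion: the recursive call processes the indices to the
-- right first, returning (next_hdr, ans) exactly as Source B's backwards for-loop carries them.
def pvBScan (header_block_name : String) (n : Int) : List (List (String × String)) → Nat → Int × Int
  | [], _ => (n, n)
  | field :: rest, i =>
    let p := pvBScan header_block_name n rest (i + 1)
    if (PySem.Dict.mk field).get? "element" = some "header" then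
      ((i : Int), if (PySem.Dict.mk field).get? "content" = some header_block_name then p.1 else p.2)
    else p

def find_index_of_end_of_header_block_py_alt (summary_fields : List (List (String × String))) (header_block_name : String) : Int :=
  (pvBScan header_block_name (PySem.List.len summary_fields) summary_fields 0).2

-- ===== PRECONDITION & SPEC =====
def Spec_find_index_of_end_of_header_block_py (summary_fields : List (List (String × String))) (header_block_name : String) (out : Int) : Prop := out = find_index_of_end_of_header_block_py_alt summary_fields header_block_name
instance (summary_fields : List (List (String × String))) (header_block_name : String) (out : Int) : Decidable (Spec_find_index_of_end_of_header_block_py summary_fields header_block_name out) := by unfold Spec_find_index_of_end_of_header_block_py; infer_instance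

-- ===== CLAIM (what is proved, stated in full; the proofs are below) =====
def Claim_equal_find_index_of_end_of_header_block_py : Prop := ∀ (summary_fields : List (List (String × String))) (header_block_name : String), Dom_find_index_of_end_of_header_block_py summary_fields header_block_name → Spec_find_index_of_end_of_header_block_py summary_fields header_block_name (find_index_of_end_of_header_block_py summary_fields header_block_name)

-- ===== LEMMAS AND PROOFS =====

-- Proof-side characterisations: first named header from index i, first header from index i.
def pvFindNamed (name : String) : List (List (String × String)) → Nat → Option Nat
  | [], _ => none
  | field :: rest, i =>
    if (PySem.Dict.mk field).get? "element" = some "header" ∧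
       (PySem.Dict.mk field).get? "content" = some name then some i
    else pvFindNamed name rest (i + 1)

def pvFindHdr : List (List (String × String)) → Nat → Option Nat
  | [], _ => none
  | field :: rest, k =>
    if (PySem.Dict.mk field).get? "element" = some "header" then some k
    else pvFindHdr rest (k + 1)

theorem pvFindNamed_ge (name : String) (l : List (List (String × String))) :
    ∀ (i j : Nat), pvFindNamed name l i = some j → i ≤ j := by
  induction l with
  | nil => intro i j h; simp [pvFindNamed] at h
  | cons f rest ih =>
    intro i j h
    by_cases hc : (PySem.Dict.mk f).get? "element" = some "header" ∧
        (PySem.Dict.mk f).get? "content" = some name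
    · simp [pvFindNamed, hc] at h; omega
    · simp [pvFindNamed, hc] at h
      have := ih (i + 1) j h
      omega

-- Once A's flag is set, the rest of the loop is the first-header search.
theorem pvALoop_true (name : String) (l : List (List (String × String))) :
    ∀ (i : Nat) (d : Int),
      pvALoop name l i true d =
        match pvFindHdr l i with
        | none => d
        | some k => (k : Int) := by
  induction l with
  | nil => intro i d; simp [pvALoop, pvFindHdr]
  | cons f rest ih =>
    intro i d
    by_cases h : (PySem.Dict.mk f).get? "element" = some "header"
    · simp [pvALoop, pvFindHdr, h]
    · simp [pvALoop, pvFindHdr, h, ih]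

-- With the flag clear, A's loop = named-header search, then first header strictly after it.
theorem pvALoop_false (name : String) (l : List (List (String × String))) :
    ∀ (i : Nat) (d : Int),
      pvALoop name l i false d =
        match pvFindNamed name l i with
        | none => d
        | some j =>
          match pvFindHdr (l.drop (j + 1 - i)) (j + 1) with
          | none => d
          | some k => (k : Int) := by
  induction l with
  | nil => intro i d; simp [pvALoop, pvFindNamed]
  | cons f rest ih =>
    intro i d
    by_cases hc : (PySem.Dict.mk f).get? "element" = some "header" ∧
        (PySem.Dict.mk f).get? "content" = some name
    · simp [pvALoop, pvFindNamed, hc, pvALoop_true]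
    · simp only [pvALoop, pvFindNamed, if_neg hc, Bool.false_eq_true, false_and, if_false, ih]
      cases hfind : pvFindNamed name rest (i + 1) with
      | none => rfl
      | some j =>
        have hij : i + 1 ≤ j := pvFindNamed_ge name rest (i + 1) j hfind
        have hdrop : (f :: rest).drop (j + 1 - i) = rest.drop (j + 1 - (i + 1)) := by
          have : j + 1 - i = (j + 1 - (i + 1)) + 1 := by omega
          simp [this]
        simp [hdrop]

-- B's next_hdr component is the first-header search.
theorem pvBScan_fst (name : String) (n : Int) (l : List (List (String × String))) :
    ∀ (i : Nat),
      (pvBScan name n l i).1 =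
        match pvFindHdr l i with
        | none => n
        | some k => (k : Int) := by
  induction l with
  | nil => intro i; simp [pvBScan, pvFindHdr]
  | cons f rest ih =>
    intro i
    by_cases h : (PySem.Dict.mk f).get? "element" = some "header"
    · simp [pvBScan, pvFindHdr, h]
    · simp [pvBScan, pvFindHdr, h, ih]

-- B's answer component equals the same two-search expression A's loop reduces to.
theorem pvBScan_snd (name : String) (n : Int) (l : List (List (String × String))) :
    ∀ (i : Nat),
      (pvBScan name n l i).2 =
        match pvFindNamed name l i with
        | none => n
        | some j =>
          match pvFindHdr (l.drop (j + 1 - i)) (j + 1) with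
          | none => n
          | some k => (k : Int) := by
  induction l with
  | nil => intro i; simp [pvBScan, pvFindNamed]
  | cons f rest ih =>
    intro i
    by_cases h1 : (PySem.Dict.mk f).get? "element" = some "header"
    · by_cases h2 : (PySem.Dict.mk f).get? "content" = some name
      · simp [pvBScan, pvFindNamed, h1, h2, pvBScan_fst]
      · have hc : ¬ ((PySem.Dict.mk f).get? "element" = some "header" ∧
            (PySem.Dict.mk f).get? "content" = some name) := by
          intro hc; exact h2 hc.2
        simp only [pvBScan, pvFindNamed, if_neg hc, if_pos h1, if_neg h2, ih]
        cases hfind : pvFindNamed name rest (i + 1) with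
        | none => rfl
        | some j =>
          have hij : i + 1 ≤ j := pvFindNamed_ge name rest (i + 1) j hfind
          have hdrop : (f :: rest).drop (j + 1 - i) = rest.drop (j + 1 - (i + 1)) := by
            have : j + 1 - i = (j + 1 - (i + 1)) + 1 := by omega
            simp [this]
          simp [hdrop]
    · have hc : ¬ ((PySem.Dict.mk f).get? "element" = some "header" ∧
          (PySem.Dict.mk f).get? "content" = some name) := by
        intro hc; exact h1 hc.1
      simp only [pvBScan, pvFindNamed, if_neg hc, if_neg h1, ih]
      cases hfind : pvFindNamed name rest (i + 1) with
      | none => rfl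
      | some j =>
        have hij : i + 1 ≤ j := pvFindNamed_ge name rest (i + 1) j hfind
        have hdrop : (f :: rest).drop (j + 1 - i) = rest.drop (j + 1 - (i + 1)) := by
          have : j + 1 - i = (j + 1 - (i + 1)) + 1 := by omega
          simp [this]
        simp [hdrop]

-- ===== VERDICT (by name: the statement is the Claim_ definition above) =====
theorem find_index_of_end_of_header_block_py_spec : Claim_equal_find_index_of_end_of_header_block_py := by
  intro sf name _
  unfold Spec_find_index_of_end_of_header_block_py
  unfold find_index_of_end_of_header_block_py find_index_of_end_of_header_block_py_alt
  rw [pvALoop_false, pvBScan_snd]
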